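-- pv_equiv track=rewrite | github.com/zanudas2332/WcSplit | main.py | get_ranges_of_lines
-- ===== SOURCE A (Python) =====
-- def get_ranges_of_lines(lines, count_of_files, remain_lines):
--     start_range = 1
--     list_of_ranges = {}
--     for current_file_number in range(count_of_files):
--         if current_file_number <= count_of_files - 2:
--             end_range = start_range + int(lines) - 1
--         else:
--             end_range = start_range + remain_lines
--         lines_in_range = str(start_range) + '-' + str(end_range)
--         list_of_ranges[lines_in_range] = {'start' : start_range, 'end': end_range}
--         start_range = start_range + int(lines)
--     return list_of_ranges
-- ===== SOURCE B (Python) =====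
-- def get_ranges_of_lines(lines, count_of_files, remain_lines):
--     # build chunk (start, end) pairs BACK-TO-FRONT, starting from the last file
--     pairs = []
--     n = count_of_files
--     if n >= 1:
--         start = 1 + (n - 1) * int(lines)
--         pairs.append((start, start + remain_lines))
--         while n >= 2:
--             n -= 1
--             start -= int(lines)
--             pairs.append((start, start + int(lines) - 1))
--     pairs.reverse()
--     return {str(s) + '-' + str(e): {'start': s, 'end': e} for (s, e) in pairs}
-- ===== Notes on version B (the rewrite author's own statement) =====
-- stated objective: alternative
-- what changed: B builds the (start,end) chunk pairs back-to-front, starting from the last file (whose end uses remain_lines) and walking starts downward by subtraction, then reverses the list and formats the dict in a separate comprehension stage, instead of A's single forward loop threading a start accumulator with an index-comparison branch inside.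
import Mathlib
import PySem

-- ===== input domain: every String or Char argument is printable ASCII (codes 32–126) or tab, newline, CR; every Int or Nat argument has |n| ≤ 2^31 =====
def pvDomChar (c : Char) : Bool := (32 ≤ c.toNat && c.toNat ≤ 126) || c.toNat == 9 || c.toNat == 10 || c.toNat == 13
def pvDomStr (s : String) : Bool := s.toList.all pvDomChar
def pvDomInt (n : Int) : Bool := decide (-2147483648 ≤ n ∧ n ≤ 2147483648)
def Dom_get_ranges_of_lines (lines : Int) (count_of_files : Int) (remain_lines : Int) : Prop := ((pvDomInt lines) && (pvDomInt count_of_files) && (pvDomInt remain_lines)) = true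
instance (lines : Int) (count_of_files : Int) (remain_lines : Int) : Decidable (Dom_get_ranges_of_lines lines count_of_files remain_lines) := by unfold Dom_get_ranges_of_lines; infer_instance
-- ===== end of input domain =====

-- B builds the chunk pairs back-to-front from the last file, reverses, then formats the
-- dict in a separate stage; objective: alternative decomposition (same cost).

-- ===== PORT A =====
-- the loop body of A: state is (start_range, dict)
def pvAstep (lines : Int) (count_of_files : Int) (remain_lines : Int)
    (st : Int × PySem.Dict String (List (String × Int))) (current_file_number : Int) :
    Int × PySem.Dict String (List (String × Int)) :=
  let end_range := if current_file_number ≤ count_of_files - 2 then st.1 + lines - 1 else st.1 + remain_lines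
  let lines_in_range := PySem.Int.toStr st.1 ++ "-" ++ PySem.Int.toStr end_range
  (st.1 + lines, st.2.insert lines_in_range [("start", st.1), ("end", end_range)])

def get_ranges_of_lines (lines : Int) (count_of_files : Int) (remain_lines : Int) : List (String × List (String × Int)) :=
  let st := (PySem.List.pyRange 0 count_of_files 1).foldl (pvAstep lines count_of_files remain_lines)
      ((1 : Int), (PySem.Dict.empty : PySem.Dict String (List (String × Int))))
  st.2.items

-- ===== PORT B =====
-- B's while loop: n counts down from count_of_files, start walks downward by lines
def pvBackLoop (lines : Int) (n : Int) (start : Int) (acc : List (Int × Int)) : List (Int × Int) :=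
  if _h : 2 ≤ n then
    pvBackLoop lines (n - 1) (start - lines) (acc ++ [(start - lines, start - lines + lines - 1)])
  else acc
termination_by n.toNat
decreasing_by omega

-- B's final stage: the dict comprehension over the (reversed) pair list
def pvIns (d : PySem.Dict String (List (String × Int))) (p : Int × Int) :
    PySem.Dict String (List (String × Int)) :=
  d.insert (PySem.Int.toStr p.1 ++ "-" ++ PySem.Int.toStr p.2) [("start", p.1), ("end", p.2)]

def get_ranges_of_lines_alt (lines : Int) (count_of_files : Int) (remain_lines : Int) : List (String × List (String × Int)) :=
  let pairs :=
    if 1 ≤ count_of_files then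
      let start := 1 + (count_of_files - 1) * lines
      pvBackLoop lines count_of_files start [(start, start + remain_lines)]
    else []
  ((pairs.reverse).foldl pvIns (PySem.Dict.empty : PySem.Dict String (List (String × Int)))).items

-- ===== PRECONDITION & SPEC =====
def Spec_get_ranges_of_lines (lines : Int) (count_of_files : Int) (remain_lines : Int) (out : List (String × List (String × Int))) : Prop := out = get_ranges_of_lines_alt lines count_of_files remain_lines
instance (lines : Int) (count_of_files : Int) (remain_lines : Int) (out : List (String × List (String × Int))) : Decidable (Spec_get_ranges_of_lines lines count_of_files remain_lines out) := by unfold Spec_get_ranges_of_lines; infer_instance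

-- ===== CLAIM =====
def Claim_equal_get_ranges_of_lines : Prop := ∀ (lines : Int) (count_of_files : Int) (remain_lines : Int), Dom_get_ranges_of_lines lines count_of_files remain_lines → Spec_get_ranges_of_lines lines count_of_files remain_lines (get_ranges_of_lines lines count_of_files remain_lines)

-- ===== LEMMAS AND PROOFS =====

-- proof-side helper: the forward list of m "full" chunks starting at s
def pvFwd (lines : Int) (s : Int) : Nat → List (Int × Int)
  | 0 => []
  | m + 1 => (s, s + lines - 1) :: pvFwd lines (s + lines) m

theorem pvFwd_snoc (lines : Int) : ∀ (m : Nat) (s : Int),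
    pvFwd lines s (m + 1) = pvFwd lines s m ++ [(s + m * lines, s + m * lines + lines - 1)] := by
  intro m
  induction m with
  | zero => intro s; simp [pvFwd]
  | succ k ih =>
    intro s
    rw [show k + 1 + 1 = (k + 1) + 1 from rfl, pvFwd, ih (s + lines)]
    rw [pvFwd]
    simp only [List.cons_append]
    congr 2 <;> (push_cast; ring_nf)

-- the while loop appends exactly (n-1) pairs, walking starts downward
theorem pvBackLoop_eq (lines : Int) : ∀ (m : Nat) (s : Int) (acc : List (Int × Int)),
    pvBackLoop lines ((m : Int) + 1) s acc
      = acc ++ (pvFwd lines (s - (m : Int) * lines) m).reverse := by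
  intro m
  induction m with
  | zero =>
    intro s acc
    rw [pvBackLoop]
    simp [pvFwd]
  | succ k ih =>
    intro s acc
    rw [pvBackLoop]
    rw [dif_pos (by push_cast; omega : 2 ≤ ((k + 1 : Nat) : Int) + 1)]
    rw [show ((k + 1 : Nat) : Int) + 1 - 1 = ((k : Nat) : Int) + 1 by push_cast; ring]
    rw [ih (s - lines)]
    rw [pvFwd_snoc]
    rw [show s - ((k + 1 : Nat) : Int) * lines = s - lines - ((k : Nat) : Int) * lines by push_cast; ring]
    rw [show s - lines - ((k : Nat) : Int) * lines + ((k : Nat) : Int) * lines = s - lines by ring]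
    simp

-- A's fold over the first m iterations (all taking the "then" branch)
theorem pvA_prefix (lines count_of_files remain_lines : Int) : ∀ (m : Nat) (k s : Int)
    (d : PySem.Dict String (List (String × Int))),
    k + m ≤ count_of_files - 1 →
    (PySem.List.pyRange k (k + m) 1).foldl (pvAstep lines count_of_files remain_lines) (s, d)
      = (s + m * lines, (pvFwd lines s m).foldl pvIns d) := by
  intro m
  induction m with
  | zero =>
    intro k s d _
    rw [PySem.List.pyRange_one_eq_nil (by omega : k + ((0:Nat):Int) ≤ k)]
    simp [pvFwd]
  | succ n ih =>
    intro k s d hk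
    have hlt : k < k + ((n + 1 : Nat) : Int) := by push_cast; omega
    rw [PySem.List.pyRange_one_cons hlt]
    simp only [List.foldl_cons]
    have hthen : k ≤ count_of_files - 2 := by push_cast at hk ⊢; omega
    have hA : pvAstep lines count_of_files remain_lines (s, d) k
        = (s + lines, pvIns d (s, s + lines - 1)) := by
      simp only [pvAstep, pvIns]
      rw [if_pos hthen]
    rw [hA]
    rw [show k + ((n + 1 : Nat) : Int) = (k + 1) + ((n : Nat) : Int) by push_cast; ring]
    rw [ih (k + 1) (s + lines) (pvIns d (s, s + lines - 1)) (by push_cast at hk ⊢; omega)]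
    rw [pvFwd]
    simp only [List.foldl_cons]
    rw [Prod.mk.injEq]
    exact ⟨by push_cast; ring, rfl⟩

theorem pv_main (lines count_of_files remain_lines : Int) :
    get_ranges_of_lines lines count_of_files remain_lines
      = get_ranges_of_lines_alt lines count_of_files remain_lines := by
  unfold get_ranges_of_lines get_ranges_of_lines_alt
  by_cases hpos : 1 ≤ count_of_files
  · have hm : ((count_of_files - 1).toNat : Int) = count_of_files - 1 := by omega
    set m : Nat := (count_of_files - 1).toNat with hmdef
    -- B side: unfold the while loop
    rw [if_pos hpos]
    have hB := pvBackLoop_eq lines m (1 + (count_of_files - 1) * lines)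
      [(1 + (count_of_files - 1) * lines, 1 + (count_of_files - 1) * lines + remain_lines)]
    rw [show ((m : Int) + 1) = count_of_files by omega] at hB
    rw [show 1 + (count_of_files - 1) * lines - (m : Int) * lines = 1 by rw [hm]; ring] at hB
    rw [hB]
    simp only [List.reverse_append, List.reverse_reverse, List.reverse_cons, List.reverse_nil,
      List.nil_append]
    -- A side: split the range at count_of_files - 1
    have hsplit : PySem.List.pyRange 0 count_of_files 1
        = PySem.List.pyRange 0 (count_of_files - 1) 1 ++ [count_of_files - 1] := by
      rw [PySem.List.pyRange_one_append 0 (count_of_files - 1) count_of_files (by omega) (by omega)]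
      congr 1
      have h := PySem.List.pyRange_one_singleton (count_of_files - 1)
      rw [show count_of_files - 1 + 1 = count_of_files by ring] at h
      exact h
    rw [hsplit, List.foldl_append]
    have hpre := pvA_prefix lines count_of_files remain_lines m 0 1
      (PySem.Dict.empty : PySem.Dict String (List (String × Int))) (by omega)
    rw [show ((0:Int) + (m : Int)) = count_of_files - 1 by omega] at hpre
    rw [hpre]
    have hbr : ¬ (count_of_files - 1 ≤ count_of_files - 2) := by omega
    simp only [List.foldl_cons, List.foldl_nil, pvAstep, if_neg hbr, List.foldl_append]
    rw [hm]
    rfl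
  · rw [if_neg hpos]
    rw [PySem.List.pyRange_one_eq_nil (by omega : count_of_files ≤ 0)]
    simp

-- ===== VERDICT =====
theorem get_ranges_of_lines_spec : Claim_equal_get_ranges_of_lines := by
  intro lines count_of_files remain_lines _
  unfold Spec_get_ranges_of_lines
  exact pv_main lines count_of_files remain_lines
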